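-- pv_equiv track=rewrite | github.com/xolinar/passgen | passgen.py | build_strengthened_base
-- ===== SOURCE A (Python) =====
-- def is_letter(ch: str) -> bool:
--     """Проверяет, является ли символ латинской буквой (A–Z или a–z)."""
--     return ("a" <= ch <= "z") or ("A" <= ch <= "Z")
--
-- def is_upper(ch: str) -> bool:
--     """Проверяет, является ли символ заглавной латинской буквой."""
--     return "A" <= ch <= "Z"
--
-- def build_strengthened_base(s0: str, q_seq: list[str]) -> str:
--     """
--     Строит усиленную базу S* из S0 по правилу:
--       - идём слева направо;
--       - перед БУКВОЙ вставляем следующий символ из Q, если слева не буква или сменился регистр;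
--       - перед цифрой/прочим символом ничего не вставляем;
--       - если подряд идут буквы одного регистра — перед второй/следующими не вставляем.
--     """
--     out: list[str] = []
--     qi = 0
--     prev = ""
--     for ch in s0:
--         if is_letter(ch):
--             if not is_letter(prev) or (is_upper(prev) != is_upper(ch)):
--                 out.append(q_seq[qi % len(q_seq)])
--                 qi += 1
--             out.append(ch)
--         else:
--             out.append(ch)
--         prev = ch
--     return "".join(out)
-- ===== SOURCE B (Python) =====
-- def is_letter(ch: str) -> bool:
--     return ("a" <= ch <= "z") or ("A" <= ch <= "Z")
--
-- def is_upper(ch: str) -> bool: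
--     return "A" <= ch <= "Z"
--
-- def build_strengthened_base(s0: str, q_seq: list[str]) -> str:
--     # Run-based: scan maximal runs of same-case letters; one Q before each run.
--     out = []
--     qi = 0
--     i = 0
--     n = len(s0)
--     while i < n:
--         ch = s0[i]
--         if is_letter(ch):
--             up = is_upper(ch)
--             j = i + 1
--             while j < n and is_letter(s0[j]) and is_upper(s0[j]) == up:
--                 j += 1
--             out.append(q_seq[qi % len(q_seq)])
--             qi += 1
--             out.append(s0[i:j])
--             i = j
--         else:
--             out.append(ch)
--             i += 1
--     return "".join(out)
-- ===== Notes on version B (the rewrite author's own statement) =====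
-- stated objective: alternative
-- what changed: B scans maximal runs of same-case letters and emits one Q-char plus the whole run at once, instead of A's char-by-char pass that tracks the previous character and re-tests the transition condition at every letter.
import Mathlib
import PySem

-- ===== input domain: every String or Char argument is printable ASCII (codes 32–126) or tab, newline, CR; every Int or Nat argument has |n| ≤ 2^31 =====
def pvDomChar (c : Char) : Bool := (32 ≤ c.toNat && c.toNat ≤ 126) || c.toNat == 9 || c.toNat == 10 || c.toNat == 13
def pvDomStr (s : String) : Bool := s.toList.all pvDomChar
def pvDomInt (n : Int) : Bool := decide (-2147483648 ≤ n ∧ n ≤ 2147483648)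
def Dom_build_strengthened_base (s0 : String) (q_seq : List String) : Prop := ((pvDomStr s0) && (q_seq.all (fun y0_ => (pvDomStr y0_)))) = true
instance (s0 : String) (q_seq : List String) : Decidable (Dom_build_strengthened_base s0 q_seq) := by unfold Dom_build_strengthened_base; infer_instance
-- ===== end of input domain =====

-- B replaces A's char-by-char pass with prev-tracking by a run-based scan (one Q per maximal
-- same-case letter run); objective: alternative decomposition, same cost.

-- ===== PORT A =====
-- is_letter / is_upper on a single character (Python passes 1-char strings here);
-- the loop variable `prev` starts as "" and is afterwards always a single char: we model it as
-- Option Char with none = "", exact because is_letter("") and is_upper("") are both False.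
def isLetter (c : Char) : Bool := ('a' ≤ c && c ≤ 'z') || ('A' ≤ c && c ≤ 'Z')
def isUpper (c : Char) : Bool := 'A' ≤ c && c ≤ 'Z'
def prevLetter : Option Char → Bool
  | none => false
  | some p => isLetter p
def prevUpper : Option Char → Bool
  | none => false
  | some p => isUpper p

-- the loop body of A; state = (out, qi, prev).  q_seq[qi % len q_seq]: under
-- Pre_ the index is in range, so getD's default is never used.
def aStep (q_seq : List String) (st : List String × Nat × Option Char) (ch : Char) :
    List String × Nat × Option Char :=
  let (out, qi, prev) := st
  if isLetter ch then
    if !prevLetter prev || (prevUpper prev != isUpper ch) then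
      (out ++ [q_seq.getD (qi % q_seq.length) "", String.singleton ch], qi + 1, some ch)
    else
      (out ++ [String.singleton ch], qi, some ch)
  else
    (out ++ [String.singleton ch], qi, some ch)

def build_strengthened_base (s0 : String) (q_seq : List String) : String :=
  PySem.Str.join "" (s0.toList.foldl (aStep q_seq) ([], 0, none)).1

-- ===== PORT B =====
-- sameRun c d: d continues a letter run of the same case as c (B's inner while condition)
def sameRun (c d : Char) : Bool := isLetter d && (isUpper d == isUpper c)

-- B's outer while loop: at a letter, scan the maximal same-case run, emit one Q plus the run
def altGo (q_seq : List String) (qi : Nat) : List Char → String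
  | [] => ""
  | c :: cs =>
    if isLetter c then
      let run := cs.takeWhile (sameRun c)
      q_seq.getD (qi % q_seq.length) "" ++ String.ofList (c :: run) ++
        altGo q_seq (qi + 1) (cs.drop run.length)
    else
      String.singleton c ++ altGo q_seq qi cs
termination_by cs => cs.length
decreasing_by
  · simp only [List.length_drop, List.length_cons]; omega
  · simp

def build_strengthened_base_alt (s0 : String) (q_seq : List String) : String :=
  altGo q_seq 0 s0.toList

-- ===== PRECONDITION & SPEC =====
-- Pre_ excludes exactly the inputs where Python A raises ZeroDivisionError (qi % len(q_seq)
-- with q_seq empty, reached iff s0 contains a Latin letter); A returns on all other inputs.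
def Pre_build_strengthened_base (s0 : String) (q_seq : List String) : Prop :=
  q_seq ≠ [] ∨ s0.toList.all (fun c => !isLetter c) = true
instance (s0 : String) (q_seq : List String) : Decidable (Pre_build_strengthened_base s0 q_seq) := by
  unfold Pre_build_strengthened_base; infer_instance

def pvWitness_build_strengthened_base : String × List String := ("Ab c", ["1", "2"])

def Spec_build_strengthened_base (s0 : String) (q_seq : List String) (out : String) : Prop := out = build_strengthened_base_alt s0 q_seq
instance (s0 : String) (q_seq : List String) (out : String) : Decidable (Spec_build_strengthened_base s0 q_seq out) := by unfold Spec_build_strengthened_base; infer_instance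

-- ===== CLAIM (what is proved, stated in full; the proofs are below) =====
def Claim_equal_build_strengthened_base : Prop := ∀ (s0 : String) (q_seq : List String), Dom_build_strengthened_base s0 q_seq → Pre_build_strengthened_base s0 q_seq → Spec_build_strengthened_base s0 q_seq (build_strengthened_base s0 q_seq)

-- ===== LEMMAS AND PROOFS =====

-- A's insertion condition, named for the proofs
def needQ (prev : Option Char) (c : Char) : Bool :=
  !prevLetter prev || (prevUpper prev != isUpper c)

-- the list of pieces A appends from state (qi, prev) onwards
def aOut (q_seq : List String) : Nat → Option Char → List Char → List String
  | _, _, [] => []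
  | qi, prev, c :: cs =>
    if isLetter c then
      if needQ prev c then
        q_seq.getD (qi % q_seq.length) "" :: String.singleton c :: aOut q_seq (qi + 1) (some c) cs
      else
        String.singleton c :: aOut q_seq qi (some c) cs
    else
      String.singleton c :: aOut q_seq qi (some c) cs

theorem join0_nil : PySem.Str.join "" [] = "" := by decide

theorem inter0_cons (a : List Char) (l : List (List Char)) :
    List.intercalate [] (a :: l) = a ++ List.intercalate [] l := by
  cases l <;> simp [List.intercalate, List.intersperse]

theorem join0_cons (x : String) (xs : List String) :
    PySem.Str.join "" (x :: xs) = x ++ PySem.Str.join "" xs := by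
  apply String.ext_iff.mpr
  simp [PySem.Str.join, PySem.Chars.join, inter0_cons]

theorem fold_aOut (q_seq : List String) (cs : List Char) :
    ∀ (out : List String) (qi : Nat) (prev : Option Char),
      (cs.foldl (aStep q_seq) (out, qi, prev)).1 = out ++ aOut q_seq qi prev cs := by
  induction cs with
  | nil => intro out qi prev; simp [aOut]
  | cons c cs ih =>
    intro out qi prev
    simp only [List.foldl_cons, aStep, aOut, needQ]
    split_ifs with h1 h2 <;> simp [ih]
 
-- head condition: if cs starts with a letter, A will insert a Q there from state prev
def headOk (prev : Option Char) : List Char → Prop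
  | [] => True
  | c :: _ => isLetter c = true → needQ prev c = true

theorem sameRun_congr (p d : Char) (h : isUpper d = isUpper p) :
    sameRun d = sameRun p := by
  funext x; simp [sameRun, h]

-- combined invariant: (a) from a state whose prev forces a Q at the next letter, A's remaining
-- output is B's; (b) inside a run started by letter p, A copies the rest of the run and continues
theorem main_inv (q_seq : List String) :
    ∀ (n : Nat) (cs : List Char), cs.length ≤ n →
      (∀ (qi : Nat) (prev : Option Char), headOk prev cs →
          PySem.Str.join "" (aOut q_seq qi prev cs) = altGo q_seq qi cs)
      ∧ (∀ (qi : Nat) (p : Char), isLetter p = true →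
          PySem.Str.join "" (aOut q_seq qi (some p) cs)
            = String.ofList (cs.takeWhile (sameRun p)) ++
              altGo q_seq qi (cs.drop (cs.takeWhile (sameRun p)).length)) := by
  intro n
  induction n with
  | zero =>
    intro cs hlen
    have : cs = [] := by cases cs <;> simp_all
    subst this
    constructor
    · intro qi prev _; simp [aOut, altGo, join0_nil]
    · intro qi p _; simp [aOut, altGo, join0_nil]
  | succ m ih =>
    intro cs hlen
    have ha : ∀ (qi : Nat) (prev : Option Char), headOk prev cs →
        PySem.Str.join "" (aOut q_seq qi prev cs) = altGo q_seq qi cs := by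
      intro qi prev hok
      cases cs with
      | nil => simp [aOut, altGo, join0_nil]
      | cons c cs' =>
        have hlen' : cs'.length ≤ m := by simp at hlen; omega
        by_cases hL : isLetter c = true
        · have hq : needQ prev c = true := hok hL
          have hb := (ih cs' hlen').2 (qi + 1) c hL
          rw [altGo]
          simp only [aOut, hL, hq, if_pos, join0_cons, hb]
          have : String.singleton c ++ String.ofList (cs'.takeWhile (sameRun c))
              = String.ofList (c :: cs'.takeWhile (sameRun c)) := by
            apply String.ext_iff.mpr; simp
          rw [← this]
          simp [String.append_assoc]
        · have hok' : headOk (some c) cs' := by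
            cases cs' with
            | nil => trivial
            | cons d _ =>
              intro hd
              simp [needQ, prevLetter, hL]
          have hA := (ih cs' hlen').1 qi (some c) hok'
          rw [altGo]
          simp [aOut, hL, join0_cons, hA]
    refine ⟨ha, ?_⟩
    intro qi p hp
    cases cs with
    | nil => simp [aOut, altGo, join0_nil]
    | cons d cs' =>
      have hlen' : cs'.length ≤ m := by simp at hlen; omega
      by_cases hs : sameRun p d = true
      · have hdL : isLetter d = true := by
          simp [sameRun] at hs; exact hs.1
        have hdu : isUpper d = isUpper p := by
          simp [sameRun] at hs; exact hs.2
        have hq : needQ (some p) d = false := by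
          simp [needQ, prevLetter, prevUpper, hp, hdu]
        have hb := (ih cs' hlen').2 qi d hdL
        rw [sameRun_congr p d hdu] at hb
        simp only [aOut, hdL, hq, if_true, if_false, Bool.false_eq_true, join0_cons, hb]
        have htw : (d :: cs').takeWhile (sameRun p) = d :: cs'.takeWhile (sameRun p) := by
          simp [hs]
        rw [htw]
        have : String.singleton d ++ String.ofList (cs'.takeWhile (sameRun p))
            = String.ofList (d :: cs'.takeWhile (sameRun p)) := by
          apply String.ext_iff.mpr; simp
        simp only [List.length_cons, List.drop_succ_cons]
        rw [← this]
        simp [String.append_assoc]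
      · have htw : (d :: cs').takeWhile (sameRun p) = [] := by
          simp [hs]
        have hok : headOk (some p) (d :: cs') := by
          intro hd
          simp only [sameRun, hd, Bool.true_and] at hs
          have hne : ¬ isUpper d = isUpper p := by simpa using hs
          simp [needQ, prevLetter, prevUpper, hp]
          exact fun h => hne h.symm
        have := ha qi (some p) hok
        rw [htw]
        simpa using this

-- ===== VERDICT (by name: the statement is the Claim_ definition above) =====
theorem build_strengthened_base_spec : Claim_equal_build_strengthened_base := by
  intro s0 q_seq _ _
  unfold Spec_build_strengthened_base build_strengthened_base build_strengthened_base_alt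
  rw [fold_aOut]
  simp only [List.nil_append]
  apply (main_inv q_seq s0.toList.length s0.toList le_rfl).1
  cases h : s0.toList with
  | nil => trivial
  | cons c cs => intro _; simp [needQ, prevLetter]
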